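-- pv_equiv track=rewrite | github.com/Psimcoe3/simcoe.ai | scripts/revit_ingestion.py | _build_lookup_key
-- ===== SOURCE A (Python) =====
-- def _build_lookup_key(record: dict) -> str:
--     parts = []
--     for key in ("category", "family_name", "type_name", "manufacturer", "part_number"):
--         value = record.get(key)
--         if value:
--             parts.append(value.lower())
--     normalized = []
--     for char in "|".join(parts):
--         normalized.append(char if char.isalnum() else "-")
--     joined = "".join(normalized)
--     while "--" in joined:
--         joined = joined.replace("--", "-")
--     return joined.strip("-")
-- ===== SOURCE B (Python) =====
-- def _build_lookup_key(record: dict) -> str: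
--     parts = []
--     for key in ("category", "family_name", "type_name", "manufacturer", "part_number"):
--         value = record.get(key)
--         if value:
--             parts.append(value.lower())
--     tokens = []
--     run = []
--     for ch in "|".join(parts):
--         if ch.isalnum():
--             run.append(ch)
--         elif run:
--             tokens.append("".join(run))
--             run = []
--     if run:
--         tokens.append("".join(run))
--     return "-".join(tokens)
-- ===== Notes on version B (the rewrite author's own statement) =====
-- stated objective: simpler
-- what changed: Replaces A's char-substitution plus repeated '--'-collapsing replace loop plus strip('-') with a single token-accumulating pass that collects maximal alphanumeric runs and joins them with '-'.
import Mathlib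
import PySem

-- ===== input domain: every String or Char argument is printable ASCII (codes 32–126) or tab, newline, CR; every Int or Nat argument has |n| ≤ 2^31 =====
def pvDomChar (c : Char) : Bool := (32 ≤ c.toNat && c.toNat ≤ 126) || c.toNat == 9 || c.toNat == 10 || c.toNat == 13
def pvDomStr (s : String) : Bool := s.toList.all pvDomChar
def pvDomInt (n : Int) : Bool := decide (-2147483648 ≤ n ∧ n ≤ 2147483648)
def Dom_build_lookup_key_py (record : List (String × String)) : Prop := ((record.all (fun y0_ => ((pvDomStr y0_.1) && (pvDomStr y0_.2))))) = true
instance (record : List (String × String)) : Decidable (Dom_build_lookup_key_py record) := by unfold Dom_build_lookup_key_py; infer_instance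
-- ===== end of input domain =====

-- B replaces A's char-substitution + repeated '--'-collapsing replace loop + strip('-')
-- with a single pass that accumulates maximal alphanumeric runs and joins them with '-'
-- (objective: simpler; same return value).

-- ===== PORT A =====

-- shared first stage (textually identical in both Pythons): the list of lowercased
-- truthy field values, as char lists ("".join over single chars is exact)
def lookup_parts (record : List (String × String)) : List (List Char) :=
  [("category" : String), "family_name", "type_name", "manufacturer", "part_number"].foldl
    (fun parts key =>
      match (PySem.Dict.ofList record).get? key with
      | some v => if v ≠ "" then parts ++ [PySem.Chars.lower v.toList] else parts
      | none => parts) []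

-- proof-side characterisation of s.replace("--", "-"), needed by the port's
-- termination proof (cited in decreasing_by), hence placed above the port
def rep2 : List Char → List Char
  | '-' :: '-' :: t => '-' :: rep2 t
  | c :: t => c :: rep2 t
  | [] => []

theorem rep2_cons (c : Char) (t : List Char)
    (h : ¬ (c = '-' ∧ ∃ t', t = '-' :: t')) : rep2 (c :: t) = c :: rep2 t := by
  rw [rep2.eq_def]
  split
  · rename_i t' heq
    exact absurd (by cases heq; exact ⟨rfl, t', rfl⟩) h
  · rename_i c' t' heq
    cases heq; rfl
  · rename_i heq; cases heq

theorem replace_go_dd (fuel : Nat) (l acc : List Char) (h : l.length ≤ fuel) :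
    PySem.Chars.replace.go ['-', '-'] ['-'] fuel l acc = acc.reverse ++ rep2 l := by
  induction fuel generalizing l acc with
  | zero =>
    have : l = [] := by cases l <;> simp_all
    subst this
    simp [PySem.Chars.replace.go, rep2]
  | succ n ih =>
    match l with
    | [] => simp [PySem.Chars.replace.go, rep2]
    | c :: t =>
      rw [PySem.Chars.replace.go]
      by_cases hp : List.isPrefixOf ['-', '-'] (c :: t)
      · rw [List.isPrefixOf_iff_prefix] at hp
        obtain ⟨t', heq⟩ := hp
        simp only [List.cons_append, List.nil_append] at heq
        cases heq
        rw [if_pos (by rw [List.isPrefixOf_iff_prefix]; exact ⟨t', rfl⟩)]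
        rw [show List.drop (['-', '-'] : List Char).length ('-' :: '-' :: t') = t' from rfl]
        rw [ih t' (['-'].reverse ++ acc) (by simp at h; omega)]
        have e : rep2 ('-' :: '-' :: t') = '-' :: rep2 t' := rfl
        rw [e]; simp
      · rw [if_neg hp]
        rw [ih t (c :: acc) (by simp at h; omega)]
        rw [rep2_cons c t]
        · simp
        · rintro ⟨rfl, t', rfl⟩
          simp [List.isPrefixOf] at hp

theorem replace_dd_eq (cs : List Char) :
    PySem.Chars.replace cs ['-', '-'] ['-'] = rep2 cs := by
  rw [PySem.Chars.replace]
  simp only [List.isEmpty_cons, Bool.false_eq_true, if_false]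
  simpa using replace_go_dd cs.length cs [] le_rfl

theorem rep2_length_le (cs : List Char) : (rep2 cs).length ≤ cs.length := by
  induction cs using rep2.induct with
  | case1 t ih =>
    have e : rep2 ('-' :: '-' :: t) = '-' :: rep2 t := rfl
    rw [e]; simp only [List.length_cons]; omega
  | case2 c t h ih =>
    rw [rep2_cons c t (by rintro ⟨rfl, t', rfl⟩; exact h t' rfl rfl)]
    simpa using ih
  | case3 => simp [rep2]

theorem rep2_length_lt (cs : List Char) (h : ['-', '-'] <:+: cs) :
    (rep2 cs).length < cs.length := by
  induction cs using rep2.induct with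
  | case1 t ih =>
    have e : rep2 ('-' :: '-' :: t) = '-' :: rep2 t := rfl
    have := rep2_length_le t
    rw [e]; simp only [List.length_cons]; omega
  | case2 c t hne ih =>
    rw [rep2_cons c t (by rintro ⟨rfl, t', rfl⟩; exact hne t' rfl rfl)]
    have ht : ['-', '-'] <:+: t := by
      rcases h with ⟨l₁, l₂, he⟩
      cases l₁ with
      | nil =>
        simp only [List.nil_append, List.cons_append] at he
        cases he
        exact (hne l₂ rfl rfl).elim
      | cons a l₁' =>
        simp only [List.cons_append] at he
        cases he
        exact ⟨l₁', l₂, by simp⟩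
    simp only [List.length_cons]
    have := ih ht
    omega
  | case3 => simp at h

theorem replace_dd_length_lt (cs : List Char)
    (h : PySem.Chars.isIn ['-', '-'] cs = true) :
    (PySem.Chars.replace cs ['-', '-'] ['-']).length < cs.length := by
  rw [replace_dd_eq]
  exact rep2_length_lt cs ((PySem.Chars.isIn_iff_infix _ _).mp h)

-- while "--" in joined: joined = joined.replace("--", "-")
def collapseA (cs : List Char) : List Char :=
  if PySem.Chars.isIn ['-', '-'] cs then
    collapseA (PySem.Chars.replace cs ['-', '-'] ['-'])
  else cs
termination_by cs.length
decreasing_by exact replace_dd_length_lt cs (by assumption)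

def build_lookup_key_py (record : List (String × String)) : String :=
  let parts := lookup_parts record
  let normalized := (PySem.Chars.join ['|'] parts).map
    (fun c => if PySem.Chars.isalnum c then c else '-')
  String.ofList (PySem.Chars.stripChars (collapseA normalized) ['-'])

-- ===== PORT B =====

def build_lookup_key_py_alt (record : List (String × String)) : String :=
  let parts := lookup_parts record
  let st := (PySem.Chars.join ['|'] parts).foldl
    (fun (st : List (List Char) × List Char) ch =>
      if PySem.Chars.isalnum ch then (st.1, st.2 ++ [ch])
      else if st.2 ≠ [] then (st.1 ++ [st.2], []) else st)
    ([], [])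
  let tokens := if st.2 ≠ [] then st.1 ++ [st.2] else st.1
  String.ofList (PySem.Chars.join ['-'] tokens)

-- ===== PRECONDITION & SPEC =====
def Spec_build_lookup_key_py (record : List (String × String)) (out : String) : Prop := out = build_lookup_key_py_alt record
instance (record : List (String × String)) (out : String) : Decidable (Spec_build_lookup_key_py record out) := by unfold Spec_build_lookup_key_py; infer_instance

-- ===== CLAIM (what is proved, stated in full; the proofs are below) =====
def Claim_equal_build_lookup_key_py : Prop := ∀ (record : List (String × String)), Dom_build_lookup_key_py record → Spec_build_lookup_key_py record (build_lookup_key_py record)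

-- ===== LEMMAS AND PROOFS =====

def dashP (c : Char) : Bool := c == '-'
def sepP (c : Char) : Bool := !PySem.Chars.isalnum c

def splitP (p : Char → Bool) : List Char → List (List Char)
  | [] => [[]]
  | c :: t => if p c then [] :: splitP p t else (c :: (splitP p t).headI) :: (splitP p t).tail

def filNE (gs : List (List Char)) : List (List Char) := gs.filter (fun g => !g.isEmpty)

def joinT : List (List Char) → List Char
  | [] => []
  | [g] => g
  | g :: gs => g ++ '-' :: joinT gs

theorem joinT_cons_cons (g h : List Char) (gs : List (List Char)) :
    joinT (g :: h :: gs) = g ++ '-' :: joinT (h :: gs) := rfl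

theorem joinT_eq_join (gs : List (List Char)) :
    PySem.Chars.join ['-'] gs = joinT gs := by
  induction gs with
  | nil => simp [PySem.Chars.join, List.intercalate, joinT]
  | cons g gs ih =>
    cases gs with
    | nil => simp [PySem.Chars.join, List.intercalate, List.intersperse, joinT]
    | cons h gs' =>
      rw [joinT_cons_cons, ← ih]
      simp [PySem.Chars.join, List.intercalate, List.intersperse]

theorem splitP_ne_nil (p : Char → Bool) (cs : List Char) : splitP p cs ≠ [] := by
  cases cs with
  | nil => simp [splitP]
  | cons c t => simp only [splitP]; split <;> simp

theorem cons_headI_tail {α : Type} [Inhabited α] (l : List α) (h : l ≠ []) :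
    l.headI :: l.tail = l := by cases l with | nil => exact absurd rfl h | cons a t => rfl

theorem foldB_eq (cs : List Char) (ts : List (List Char)) (run : List Char) :
    (if (cs.foldl
          (fun (st : List (List Char) × List Char) ch =>
            if PySem.Chars.isalnum ch then (st.1, st.2 ++ [ch])
            else if st.2 ≠ [] then (st.1 ++ [st.2], []) else st)
          (ts, run)).2 ≠ [] then
        (cs.foldl
          (fun (st : List (List Char) × List Char) ch =>
            if PySem.Chars.isalnum ch then (st.1, st.2 ++ [ch])
            else if st.2 ≠ [] then (st.1 ++ [st.2], []) else st)
          (ts, run)).1 ++ [(cs.foldl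
          (fun (st : List (List Char) × List Char) ch =>
            if PySem.Chars.isalnum ch then (st.1, st.2 ++ [ch])
            else if st.2 ≠ [] then (st.1 ++ [st.2], []) else st)
          (ts, run)).2]
      else (cs.foldl
          (fun (st : List (List Char) × List Char) ch =>
            if PySem.Chars.isalnum ch then (st.1, st.2 ++ [ch])
            else if st.2 ≠ [] then (st.1 ++ [st.2], []) else st)
          (ts, run)).1)
    = ts ++ filNE ((run ++ (splitP sepP cs).headI) :: (splitP sepP cs).tail) := by
  induction cs generalizing ts run with
  | nil =>
    simp only [List.foldl_nil, splitP]
    cases run <;> simp [filNE]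
  | cons c t ih =>
    simp only [List.foldl_cons]
    by_cases ha : PySem.Chars.isalnum c
    · rw [if_pos ha, ih]
      have hs : sepP c = false := by simp [sepP, ha]
      simp only [splitP, hs, Bool.false_eq_true, if_false, List.headI_cons, List.tail_cons]
      simp [List.append_assoc]
    · have hs : sepP c = true := by simp [sepP, ha]
      by_cases hr : run = []
      · subst hr
        rw [if_neg ha, if_neg (show ¬(([] : List Char) ≠ []) by simp), ih]
        simp only [splitP, hs, if_true, List.headI_cons, List.tail_cons, List.nil_append, List.append_nil]
        rw [cons_headI_tail _ (splitP_ne_nil sepP t)]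
        simp [filNE]
      · rw [if_neg ha, if_pos hr, ih]
        simp only [splitP, hs, if_true, List.headI_cons, List.tail_cons, List.nil_append]
        rw [cons_headI_tail _ (splitP_ne_nil sepP t)]
        simp [filNE, hr]

theorem splitP_pos {p : Char → Bool} {c : Char} (t : List Char) (h : p c = true) :
    splitP p (c :: t) = [] :: splitP p t := by simp [splitP, h]

theorem splitP_neg {p : Char → Bool} {c : Char} (t : List Char) (h : p c = false) :
    splitP p (c :: t) = (c :: (splitP p t).headI) :: (splitP p t).tail := by
  simp [splitP, h]

theorem filNE_nil_cons (gs : List (List Char)) : filNE ([] :: gs) = filNE gs := by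
  simp [filNE]

theorem filNE_cons (c : Char) (g : List Char) (gs : List (List Char)) :
    filNE ((c :: g) :: gs) = (c :: g) :: filNE gs := by simp [filNE]

theorem dashP_dash : dashP '-' = true := by decide

theorem isalnum_dash : PySem.Chars.isalnum '-' = false := by decide

theorem splitP_map_norm (cs : List Char) :
    splitP dashP (cs.map (fun c => if PySem.Chars.isalnum c then c else '-'))
      = splitP sepP cs := by
  induction cs with
  | nil => rfl
  | cons c t ih =>
    by_cases ha : PySem.Chars.isalnum c
    · have hna : (if PySem.Chars.isalnum c then c else '-') = c := by simp [ha]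
      have hd : dashP c = false := by
        simp only [dashP, beq_eq_false_iff_ne, ne_eq]
        rintro rfl; rw [isalnum_dash] at ha; cases ha
      have hs : sepP c = false := by simp [sepP, ha]
      rw [List.map_cons, hna, splitP_neg (t.map (fun c => if PySem.Chars.isalnum c then c else '-')) hd, splitP_neg t hs, ih]
    · have hna : (if PySem.Chars.isalnum c then c else '-') = '-' := by simp [ha]
      have hs : sepP c = true := by simp [sepP, ha]
      rw [List.map_cons, hna, splitP_pos _ dashP_dash, splitP_pos t hs, ih]

theorem filNE_eq_of (xs ys : List (List Char)) (hx : xs ≠ []) (hy : ys ≠ [])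
    (h1 : xs.headI = ys.headI) (h2 : filNE xs.tail = filNE ys.tail) :
    filNE xs = filNE ys := by
  rw [← cons_headI_tail xs hx, ← cons_headI_tail ys hy]
  simp only [filNE, List.filter_cons] at h2 ⊢
  rw [h1, h2]

theorem rep2_splitP (cs : List Char) :
    (splitP dashP (rep2 cs)).headI = (splitP dashP cs).headI ∧
      filNE (splitP dashP (rep2 cs)).tail = filNE (splitP dashP cs).tail := by
  induction cs using rep2.induct with
  | case1 t ih =>
    have e : rep2 ('-' :: '-' :: t) = '-' :: rep2 t := rfl
    rw [e, splitP_pos _ dashP_dash, splitP_pos _ dashP_dash, splitP_pos _ dashP_dash]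
    refine ⟨rfl, ?_⟩
    simp only [List.tail_cons]
    rw [filNE_nil_cons]
    exact filNE_eq_of _ _ (splitP_ne_nil _ _) (splitP_ne_nil _ _) ih.1 ih.2
  | case2 c t hne ih =>
    rw [rep2_cons c t (by rintro ⟨rfl, t', rfl⟩; exact hne t' rfl rfl)]
    by_cases hd : dashP c
    · rw [splitP_pos _ hd, splitP_pos _ hd]
      refine ⟨rfl, ?_⟩
      simp only [List.tail_cons]
      exact filNE_eq_of _ _ (splitP_ne_nil _ _) (splitP_ne_nil _ _) ih.1 ih.2
    · rw [splitP_neg _ (by simpa using hd), splitP_neg _ (by simpa using hd)]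
      refine ⟨by rw [List.headI_cons, List.headI_cons, ih.1], ?_⟩
      simp only [List.tail_cons]
      exact ih.2
  | case3 => exact ⟨rfl, rfl⟩

theorem rep2_filNE (cs : List Char) :
    filNE (splitP dashP (rep2 cs)) = filNE (splitP dashP cs) :=
  filNE_eq_of _ _ (splitP_ne_nil _ _) (splitP_ne_nil _ _) (rep2_splitP cs).1 (rep2_splitP cs).2

theorem collapseA_spec (cs : List Char) :
    PySem.Chars.isIn ['-', '-'] (collapseA cs) = false ∧
      filNE (splitP dashP (collapseA cs)) = filNE (splitP dashP cs) := by
  induction cs using collapseA.induct with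
  | case1 cs h ih =>
    rw [collapseA, if_pos h]
    refine ⟨ih.1, ?_⟩
    rw [ih.2, replace_dd_eq, rep2_filNE]
  | case2 cs h =>
    rw [collapseA, if_neg h]
    exact ⟨by simpa using h, rfl⟩

theorem joinT_ne_nil (g : List Char) (gs : List (List Char)) (h : g ≠ []) :
    joinT (g :: gs) ≠ [] := by
  cases gs with
  | nil => simpa [joinT] using h
  | cons a l => rw [joinT_cons_cons]; simp [h]

theorem joinT_filNE_nil (gs : List (List Char)) (h : joinT (filNE gs) = []) :
    filNE gs = [] := by
  by_contra hne
  obtain ⟨g, gs', hg⟩ := List.exists_cons_of_ne_nil hne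
  have hmem : g ∈ filNE gs := hg ▸ List.mem_cons_self
  have : ¬ g.isEmpty := by
    have := List.of_mem_filter hmem
    simpa using this
  exact joinT_ne_nil g gs' (by simpa using this) (hg ▸ h)

theorem joinT_cons_head (c : Char) (g : List Char) (gs : List (List Char)) :
    joinT ((c :: g) :: gs) = c :: joinT (g :: gs) := by
  cases gs with
  | nil => rfl
  | cons a l => rw [joinT_cons_cons, joinT_cons_cons]; rfl

theorem rstripD_cons (c : Char) (t : List Char) :
    (List.dropWhile dashP (c :: t).reverse).reverse
      = if (List.dropWhile dashP t.reverse).reverse = [] then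
          (if dashP c then [] else [c])
        else c :: (List.dropWhile dashP t.reverse).reverse := by
  rw [List.reverse_cons, List.dropWhile_append]
  by_cases h : (List.dropWhile dashP t.reverse).isEmpty
  · rw [if_pos h, if_pos (by simpa using h)]
    cases hd : dashP c <;> simp [List.dropWhile, hd]
  · rw [if_neg h, if_neg (by simpa using h)]
    simp

theorem rstripD_eq_joinT (cs : List Char)
    (hdd : ¬ (['-', '-'] <:+: cs)) (hhd : ∀ t', cs ≠ '-' :: t') :
    (List.dropWhile dashP cs.reverse).reverse = joinT (filNE (splitP dashP cs)) := by
  suffices H : ∀ n (cs : List Char), cs.length ≤ n → ¬ (['-', '-'] <:+: cs) →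
      (∀ t', cs ≠ '-' :: t') →
      (List.dropWhile dashP cs.reverse).reverse = joinT (filNE (splitP dashP cs)) from
    H cs.length cs le_rfl hdd hhd
  intro n
  induction n with
  | zero =>
    intro cs hlen _ _
    have : cs = [] := by cases cs <;> simp_all
    subst this; rfl
  | succ n ih =>
    intro cs hlen hdd hhd
    match cs with
    | [] => rfl
    | c :: t =>
      have hc : dashP c = false := by
        simp only [dashP, beq_eq_false_iff_ne, ne_eq]
        rintro rfl; exact hhd t rfl
      rw [rstripD_cons]
      match t with
      | [] =>
        rw [if_pos (by rfl), if_neg (by simp [hc])]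
        rw [splitP_neg _ hc]
        rfl
      | d :: t' =>
        by_cases hdash : d = '-'
        · subst hdash
          have hdd' : ¬ (['-', '-'] <:+: t') := fun hi => by
            obtain ⟨l₁, l₂, he⟩ := hi
            exact hdd ⟨c :: '-' :: l₁, l₂, by simp [← he]⟩
          have hhd' : ∀ u, t' ≠ '-' :: u := fun u hu =>
            hdd ⟨[c], u, by simp [hu]⟩
          have hIH := ih t' (by simp at hlen; omega) hdd' hhd'
          have hsplit : splitP dashP (c :: '-' :: t') = [c] :: splitP dashP t' := by
            rw [splitP_neg _ hc, splitP_pos _ dashP_dash]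
            simp
          rw [hsplit, filNE_cons]
          have hrt : (List.dropWhile dashP (('-' :: t' : List Char)).reverse).reverse
              = if (List.dropWhile dashP t'.reverse).reverse = [] then []
                else '-' :: (List.dropWhile dashP t'.reverse).reverse := by
            rw [rstripD_cons]
            by_cases h0 : (List.dropWhile dashP t'.reverse).reverse = []
            · rw [if_pos h0, if_pos h0, if_pos dashP_dash]
            · rw [if_neg h0, if_neg h0]
          by_cases h0 : (List.dropWhile dashP t'.reverse).reverse = []
          · have hfil : filNE (splitP dashP t') = [] :=
              joinT_filNE_nil _ (by rw [← hIH]; exact h0)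
            rw [hrt, if_pos h0, if_pos rfl, if_neg (show ¬ dashP c = true by simp [hc]), hfil]
            rfl
          · have hfil : filNE (splitP dashP t') ≠ [] := fun hf => by
              rw [hIH, hf] at h0; exact h0 rfl
            obtain ⟨g, gs', hg⟩ := List.exists_cons_of_ne_nil hfil
            rw [hrt, if_neg h0,
              if_neg (show ¬ ('-' :: (List.dropWhile dashP t'.reverse).reverse) = [] by simp)]
            rw [hg, joinT_cons_cons, hIH, hg]
            rfl
        · have hd : dashP d = false := by simp [dashP, hdash]
          have hdd' : ¬ (['-', '-'] <:+: (d :: t')) := fun hi => by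
            obtain ⟨l₁, l₂, he⟩ := hi
            exact hdd ⟨c :: l₁, l₂, by simp [← he]⟩
          have hhd' : ∀ u, (d :: t') ≠ '-' :: u := fun u hu => by
            rw [List.cons_eq_cons] at hu
            exact hdash hu.1
          have hIH := ih (d :: t') (by simp at hlen ⊢; omega) hdd' hhd'
          have hne : (List.dropWhile dashP ((d :: t' : List Char)).reverse).reverse ≠ [] := by
            rw [hIH, splitP_neg _ hd, filNE_cons]
            exact joinT_ne_nil _ _ (by simp)
          rw [if_neg hne, hIH]
          rw [splitP_neg _ hc, splitP_neg _ hd]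
          simp only [List.headI_cons, List.tail_cons]
          rw [filNE_cons, filNE_cons, joinT_cons_head, joinT_cons_head, joinT_cons_head]

theorem dropWhile_dash_not_dash_head (cs : List Char) (u : List Char) :
    List.dropWhile dashP cs ≠ '-' :: u := by
  induction cs with
  | nil => simp [List.dropWhile]
  | cons a t ih =>
    rw [List.dropWhile_cons]
    by_cases h : dashP a
    · simpa [h] using ih
    · intro he
      rw [if_neg (by simpa using h)] at he
      rw [List.cons_eq_cons] at he
      rw [he.1, dashP_dash] at h
      exact h rfl

theorem canon_dropWhile (cs : List Char) :
    filNE (splitP dashP (List.dropWhile dashP cs)) = filNE (splitP dashP cs) := by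
  induction cs with
  | nil => rfl
  | cons a t ih =>
    rw [List.dropWhile_cons]
    by_cases h : dashP a
    · rw [if_pos h, splitP_pos _ h, filNE_nil_cons, ih]
    · rw [if_neg (by simpa using h)]

theorem contains_dash_eq (c : Char) : (['-'] : List Char).contains c = dashP c := by
  by_cases h : c = '-' <;> simp [h, dashP]

theorem strip_eq_joinT (cs : List Char) (hdd : PySem.Chars.isIn ['-', '-'] cs = false) :
    PySem.Chars.stripChars cs ['-'] = joinT (filNE (splitP dashP cs)) := by
  have hinf : ¬ (['-', '-'] <:+: cs) := by
    intro h
    rw [(PySem.Chars.isIn_iff_infix _ _).mpr h] at hdd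
    cases hdd
  rw [PySem.Chars.stripChars]
  simp only [contains_dash_eq]
  have hsub : ¬ (['-', '-'] <:+: List.dropWhile dashP cs) := fun h =>
    hinf (h.trans (List.dropWhile_suffix dashP).isInfix)
  rw [rstripD_eq_joinT (List.dropWhile dashP cs) hsub (dropWhile_dash_not_dash_head cs)]
  rw [canon_dropWhile]

-- ===== VERDICT (by name: the statement is the Claim_ definition above) =====
theorem key_eq (text : List Char) :
    String.ofList (PySem.Chars.stripChars
      (collapseA (text.map (fun c => if PySem.Chars.isalnum c then c else '-'))) ['-'])
    = String.ofList (PySem.Chars.join ['-']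
        (if (text.foldl
              (fun (st : List (List Char) × List Char) ch =>
                if PySem.Chars.isalnum ch then (st.1, st.2 ++ [ch])
                else if st.2 ≠ [] then (st.1 ++ [st.2], []) else st)
              ([], [])).2 ≠ [] then
            (text.foldl
              (fun (st : List (List Char) × List Char) ch =>
                if PySem.Chars.isalnum ch then (st.1, st.2 ++ [ch])
                else if st.2 ≠ [] then (st.1 ++ [st.2], []) else st)
              ([], [])).1 ++ [(text.foldl
              (fun (st : List (List Char) × List Char) ch =>
                if PySem.Chars.isalnum ch then (st.1, st.2 ++ [ch])
                else if st.2 ≠ [] then (st.1 ++ [st.2], []) else st)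
              ([], [])).2]
          else (text.foldl
              (fun (st : List (List Char) × List Char) ch =>
                if PySem.Chars.isalnum ch then (st.1, st.2 ++ [ch])
                else if st.2 ≠ [] then (st.1 ++ [st.2], []) else st)
              ([], [])).1)) := by
  have hc := collapseA_spec (text.map (fun c => if PySem.Chars.isalnum c then c else '-'))
  rw [strip_eq_joinT _ hc.1, hc.2, splitP_map_norm]
  rw [foldB_eq text [] []]
  simp only [List.nil_append]
  rw [cons_headI_tail _ (splitP_ne_nil sepP text)]
  rw [joinT_eq_join]

theorem build_lookup_key_py_spec : Claim_equal_build_lookup_key_py := by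
  intro record _
  exact key_eq (PySem.Chars.join ['|'] (lookup_parts record))
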